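-- pv_equiv track=rewrite | github.com/anisov/ya-algorithms | sprint_8/4.py | find_pattern_indexes
-- ===== SOURCE A (Python) =====
-- from typing import (
--     List,
--     Set,
-- )
--
-- def find_pattern_indexes(
--     measurements: List[int],
--     pattern: List[int],
-- ) -> List[int]:
--     indexes: List[int] = []
--     for i in range(len(pattern) - 1, len(measurements)):
--         offset: int = i - (len(pattern) - 1)
--         measurements_slice: List[int] = measurements[offset : i + 1]
--         diff: Set[int] = set(
--             (x - y for x, y in zip(measurements_slice, pattern))
--         )
--         if len(diff) == 1:
--             indexes.append(offset + 1)
--     return indexes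
-- ===== SOURCE B (Python) =====
-- def find_pattern_indexes(measurements, pattern):
--     # Match on consecutive-difference arrays: a window matches the pattern up to a
--     # constant offset iff its adjacent differences equal the pattern's.
--     if not pattern:
--         return []
--     dm = [b - a for a, b in zip(measurements, measurements[1:])]
--     dp = [b - a for a, b in zip(pattern, pattern[1:])]
--     m = len(pattern)
--     return [j + 1 for j in range(len(measurements) - m + 1)
--             if dm[j:j + m - 1] == dp]
-- ===== Notes on version B (the rewrite author's own statement) =====
-- stated objective: alternative
-- what changed: Instead of building a set of window-vs-pattern differences for every window, B computes the consecutive-difference arrays of measurements and pattern once and reports the windows whose difference-array slice equals the pattern's difference array.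
import Mathlib
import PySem

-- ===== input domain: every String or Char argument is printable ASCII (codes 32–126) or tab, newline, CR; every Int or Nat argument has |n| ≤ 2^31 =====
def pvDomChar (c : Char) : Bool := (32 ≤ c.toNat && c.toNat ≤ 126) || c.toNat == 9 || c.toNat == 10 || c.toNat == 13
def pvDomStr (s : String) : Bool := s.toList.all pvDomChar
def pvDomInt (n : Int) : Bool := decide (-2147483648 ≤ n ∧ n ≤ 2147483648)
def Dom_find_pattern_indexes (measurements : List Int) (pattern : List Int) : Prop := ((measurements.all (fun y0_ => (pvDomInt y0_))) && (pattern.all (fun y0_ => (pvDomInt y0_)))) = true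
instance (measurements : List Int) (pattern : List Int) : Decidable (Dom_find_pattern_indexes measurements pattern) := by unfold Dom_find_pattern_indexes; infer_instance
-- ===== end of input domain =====

-- B tests each window by comparing consecutive-difference arrays instead of
-- building a set of window-vs-pattern differences per window (objective: alternative).


-- ===== PORT A =====
-- for i in range(len(pattern)-1, len(measurements)): slice the window, collect the
-- pairwise differences into a set, append offset+1 when the set is a singleton.
def find_pattern_indexes (measurements : List Int) (pattern : List Int) : List Int :=
  (PySem.List.pyRange ((pattern.length : Int) - 1) (measurements.length : Int) 1).foldl
    (fun indexes i =>
      let offset : Int := i - ((pattern.length : Int) - 1)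
      let measurements_slice : List Int := PySem.List.slice measurements (some offset) (some (i + 1))
      let diff : PySem.Set Int :=
        PySem.Set.ofList (List.zipWith (fun x y => x - y) measurements_slice pattern)
      if PySem.List.len diff == 1 then indexes ++ [offset + 1] else indexes)
    []

-- ===== PORT B =====
-- consecutive-difference arrays of both lists; window matches iff its dm-slice equals dp.
def find_pattern_indexes_alt (measurements : List Int) (pattern : List Int) : List Int :=
  if pattern = [] then []
  else
    let dm : List Int :=
      (List.zip measurements (PySem.List.slice measurements (some 1) none)).map
        (fun ab => ab.2 - ab.1)
    let dp : List Int :=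
      (List.zip pattern (PySem.List.slice pattern (some 1) none)).map
        (fun ab => ab.2 - ab.1)
    let m : Int := pattern.length
    ((PySem.List.pyRange 0 ((measurements.length : Int) - m + 1) 1).filter
        (fun j => PySem.List.slice dm (some j) (some (j + m - 1)) == dp)).map
      (fun j => j + 1)

-- ===== PRECONDITION & SPEC =====
def Spec_find_pattern_indexes (measurements : List Int) (pattern : List Int) (out : List Int) : Prop := out = find_pattern_indexes_alt measurements pattern
instance (measurements : List Int) (pattern : List Int) (out : List Int) : Decidable (Spec_find_pattern_indexes measurements pattern out) := by unfold Spec_find_pattern_indexes; infer_instance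

-- ===== CLAIM (what is proved, stated in full; the proofs are below) =====
def Claim_equal_find_pattern_indexes : Prop := ∀ (measurements : List Int) (pattern : List Int), Dom_find_pattern_indexes measurements pattern → Spec_find_pattern_indexes measurements pattern (find_pattern_indexes measurements pattern)

-- ===== LEMMAS AND PROOFS =====

-- adjacent (consecutive) differences of a list
def pvAdj (l : List Int) : List Int := List.zipWith (fun a b => b - a) l l.tail

-- B's comprehension over zip computes pvAdj
theorem pvAdj_eq_zipmap (l : List Int) :
    (List.zip l l.tail).map (fun ab => ab.2 - ab.1) = pvAdj l := by
  simp [pvAdj, List.zip_eq_zipWith, List.map_zipWith]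

theorem foldl_add_all_eq (a : Int) (t : List Int) (h : ∀ y ∈ t, y = a) :
    t.foldl PySem.Set.add [a] = [a] := by
  induction t with
  | nil => rfl
  | cons b t ih =>
    have hb : b = a := h b (by simp)
    have : PySem.Set.add [a] b = [a] := by
      simp [PySem.Set.add, PySem.Set.contains, hb]
    rw [List.foldl_cons, this, ih (fun y hy => h y (by simp [hy]))]

-- set(a :: t) is a singleton iff every element of t equals a
theorem set_len_one_iff (a : Int) (t : List Int) :
    (PySem.Set.ofList (a :: t)).length = 1 ↔ ∀ y ∈ t, y = a := by
  constructor
  · intro h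
    obtain ⟨b, hb⟩ := List.length_eq_one_iff.mp h
    intro y hy
    have hyb : y = b := by
      have : y ∈ PySem.Set.ofList (a :: t) := (PySem.Set.mem_ofList _ _).mpr (by simp [hy])
      simpa [hb] using this
    have hab : a = b := by
      have : a ∈ PySem.Set.ofList (a :: t) := (PySem.Set.mem_ofList _ _).mpr (by simp)
      simpa [hb] using this
    omega
  · intro h
    have h0 : PySem.Set.ofList (a :: t) = t.foldl PySem.Set.add [a] := by
      simp [PySem.Set.ofList, PySem.Set.empty, PySem.Set.add, PySem.Set.contains]
    rw [h0, foldl_add_all_eq a t h]; rfl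

-- all window-vs-pattern differences agree iff the adjacent differences agree
theorem all_eq_iff_adj_eq (w p : List Int) (hl : w.length = p.length) (x y : Int) :
    ((∀ z ∈ List.zipWith (fun u v => u - v) w p, z = x - y) ↔ pvAdj (x :: w) = pvAdj (y :: p)) := by
  induction w generalizing p x y with
  | nil =>
    have : p = [] := by simpa using hl.symm
    subst this; simp [pvAdj]
  | cons x' w' ih =>
    cases p with
    | nil => simp at hl
    | cons y' p' =>
      have hl' : w'.length = p'.length := by simpa using hl
      have hstep := ih p' hl' x' y'
      constructor
      · intro h
        have h1 : x' - y' = x - y := h _ (by simp)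
        have h2 : ∀ z ∈ List.zipWith (fun u v => u - v) w' p', z = x' - y' := by
          intro z hz; rw [h1]; exact h z (by simp [hz])
        have htail := hstep.mp h2
        simp only [pvAdj, List.tail_cons, List.zipWith_cons_cons, List.cons.injEq]
        exact ⟨by omega, by simpa [pvAdj] using htail⟩
      · intro h
        simp only [pvAdj, List.tail_cons, List.zipWith_cons_cons, List.cons.injEq] at h
        obtain ⟨h1, h2⟩ := h
        have htail := hstep.mpr (by simpa [pvAdj] using h2)
        intro z hz
        simp only [List.zipWith_cons_cons, List.mem_cons] at hz
        rcases hz with hz | hz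
        · omega
        · have := htail z hz; omega

theorem tail_take_aux (l : List Int) (m : Nat) : (l.take m).tail = l.tail.take (m - 1) := by
  cases l with
  | nil => simp
  | cons a t => cases m with
    | zero => simp
    | succ m' => simp

theorem zipWith_take_left_aux (f : Int → Int → Int) :
    ∀ (v l : List Int) (a : Nat), v.length ≤ a →
      List.zipWith f (l.take a) v = List.zipWith f l v := by
  intro v
  induction v with
  | nil => simp
  | cons b v' ih =>
    intro l a ha
    cases l with
    | nil => simp
    | cons x l' =>
      cases a with
      | zero => simp at ha
      | succ a' =>
        simp only [List.take_succ_cons, List.zipWith_cons_cons]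
        rw [ih l' a' (by simpa using ha)]

theorem pvAdj_take (l : List Int) (m : Nat) : pvAdj (l.take m) = (pvAdj l).take (m - 1) := by
  simp only [pvAdj, List.take_zipWith, tail_take_aux]
  rw [zipWith_take_left_aux _ (l.tail.take (m-1)) l m (by rw [List.length_take]; omega),
      zipWith_take_left_aux _ (l.tail.take (m-1)) l (m-1) (by rw [List.length_take]; omega)]

theorem pvAdj_drop (l : List Int) (k : Nat) : pvAdj (l.drop k) = (pvAdj l).drop k := by
  simp only [pvAdj, List.drop_zipWith, List.tail_drop]
  congr 1
  rw [← List.drop_one, List.drop_drop, Nat.add_comm]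

-- the pointwise equivalence of A's window test and B's difference-slice test
theorem window_iff (ms p : List Int) (k : Nat) (hp : p ≠ [])
    (hk : k + p.length ≤ ms.length) :
    ((PySem.Set.ofList (List.zipWith (fun x y => x - y) ((ms.drop k).take p.length) p)).length = 1
      ↔ ((pvAdj ms).drop k).take (p.length - 1) = pvAdj p) := by
  cases p with
  | nil => exact absurd rfl hp
  | cons y pt =>
    have hlen : ((ms.drop k).take (y :: pt).length).length = (y :: pt).length := by
      rw [List.length_take, List.length_drop]
      simp only [List.length_cons] at hk ⊢
      omega
    obtain ⟨x, wt, hw⟩ : ∃ x wt, (ms.drop k).take (y :: pt).length = x :: wt := by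
      cases h : (ms.drop k).take (y :: pt).length with
      | nil => rw [h] at hlen; simp at hlen
      | cons a b => exact ⟨a, b, rfl⟩
    have hwt : wt.length = pt.length := by
      rw [hw] at hlen; simpa using hlen
    rw [hw, List.zipWith_cons_cons, set_len_one_iff, all_eq_iff_adj_eq wt pt hwt x y]
    have h2 : pvAdj (x :: wt) = ((pvAdj ms).drop k).take ((y :: pt).length - 1) := by
      rw [← hw, pvAdj_take, pvAdj_drop]
    rw [h2]

-- ===== VERDICT (by name: the statement is the Claim_ definition above) =====
-- generic congruence for "map f over filter P over a mapped index range"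
theorem map_filter_map_congr {g1 g2 : Nat → Int} {P1 P2 : Int → Bool} {f1 f2 : Int → Int} (N : Nat)
    (hP : ∀ k, k < N → P1 (g1 k) = P2 (g2 k))
    (hf : ∀ k, k < N → f1 (g1 k) = f2 (g2 k)) :
    (((List.range N).map g1).filter P1).map f1 = (((List.range N).map g2).filter P2).map f2 := by
  rw [List.filter_map, List.map_map, List.filter_map, List.map_map]
  rw [List.filter_congr (l := List.range N) (q := P2 ∘ g2)
    (fun x hx => by simpa using hP x (List.mem_range.mp hx))]
  refine List.map_congr_left ?_
  intro x hx
  have hxN : x < N := List.mem_range.mp (List.mem_of_mem_filter hx)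
  simpa using hf x hxN

theorem find_pattern_indexes_spec : Claim_equal_find_pattern_indexes := by
  intro ms p _
  unfold Spec_find_pattern_indexes
  by_cases hp : p = []
  · subst hp
    simp only [find_pattern_indexes_alt, find_pattern_indexes]
    rw [PySem.List.foldl_append_if]
    simp [List.zipWith_nil_right, PySem.Set.ofList, PySem.Set.empty, PySem.List.len]
  · simp only [find_pattern_indexes]
    rw [PySem.List.foldl_append_if, PySem.List.pyRange_one, List.nil_append]
    simp only [find_pattern_indexes_alt, if_neg hp, PySem.List.slice_from_one, pvAdj_eq_zipmap,
      PySem.List.pyRange_one]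
    have hN : ((ms.length : Int) - ((p.length : Int) - 1)).toNat
        = ((ms.length : Int) - (p.length : Int) + 1 - 0).toNat := by omega
    rw [hN]
    refine map_filter_map_congr _ ?_ ?_
    · intro k hkN
      have hk : k + p.length ≤ ms.length := by omega
      show (PySem.List.len (PySem.Set.ofList (List.zipWith (fun x y => x - y)
          (PySem.List.slice ms (some (((p.length : Int) - 1) + (k : Int) - ((p.length : Int) - 1)))
            (some ((((p.length : Int) - 1) + (k : Int)) + 1))) p)) == 1)
        = (PySem.List.slice (pvAdj ms) (some (0 + (k : Int)))
            (some ((0 + (k : Int)) + (p.length : Int) - 1)) == pvAdj p)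
      have e1 : ((p.length : Int) - 1) + (k : Int) - ((p.length : Int) - 1) = ((k : Nat) : Int) := by ring
      have e2 : (((p.length : Int) - 1) + (k : Int)) + 1 = ((k : Nat) : Int) + ((p.length : Nat) : Int) := by
        ring
      have e3 : 0 + (k : Int) = ((k : Nat) : Int) := by ring
      have e4 : ((k : Nat) : Int) + (p.length : Int) - 1 = ((k : Nat) : Int) + ((p.length - 1 : Nat) : Int) := by
        have hp0 : p.length ≠ 0 := fun h => hp (List.eq_nil_of_length_eq_zero h)
        push_cast [Nat.cast_sub (by omega : 1 ≤ p.length)]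
        ring
      rw [e1, e2, e3, e4, PySem.List.slice_natCast_add, PySem.List.slice_natCast_add]
      rw [Bool.eq_iff_iff]
      simp only [beq_iff_eq, PySem.List.len_eq, Nat.cast_eq_one]
      exact window_iff ms p k hp hk
    · intro k _
      omega
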